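-- pv_equiv track=rewrite | github.com/anhphan2705/library_management | library_management.py | money_paid
-- ===== SOURCE A (Python) =====
-- def money_paid(late_tracking_log, fine_tracker):
--     """
--     This function detects the amount of money student pay.
--
--     Param:
--     - late_tracking_log: a list that contains all the late return students's info. Format: [ [student], [book], [late_day_need_to_pay] ]
--     - fine_tracker: a dictionary contains student names and the fine they have to pay. Format: {student: [fine_total, fine_paid_off, fine_owe]}
--
--     Return: {student: [fine_total, fine_paid_off, fine_owe]}
--     - late_tracking_log: a list that contains all the late return students's info. Format: [ [student], [book], [late_day_need_to_pay] ]
--     """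
--     length_log = len(late_tracking_log[0])
--     is_remove = False
--     for index in range(len(late_tracking_log[0])):
--         name = late_tracking_log[0][index]
--         if name not in list(fine_tracker.keys()):
--             late_tracking_log[0].pop(index)
--             late_tracking_log[1].pop(index)
--             late_tracking_log[2].pop(index)
--             is_remove = True
--         if length_log > 1 and is_remove:
--             return money_paid(late_tracking_log, fine_tracker)
--
--     return late_tracking_log
-- ===== SOURCE B (Python) =====
-- def money_paid(late_tracking_log, fine_tracker):
--     # Mutates the three sublists in place (like A) and returns the same object.
--     index = 0
--     while index < len(late_tracking_log[0]):
--         if late_tracking_log[0][index] not in fine_tracker: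
--             late_tracking_log[0].pop(index)
--             late_tracking_log[1].pop(index)
--             late_tracking_log[2].pop(index)
--         else:
--             index += 1
--     return late_tracking_log
-- ===== Notes on version B (the rewrite author's own statement) =====
-- stated objective: faster
-- what changed: Replaced A's restart-the-whole-function recursion (which re-scans the log from index 0 after every removal, guarded by a length_log/is_remove flag protocol) by a single in-place while loop that pops the current index from all three sublists or advances, with no recursion and no flags.
import Mathlib
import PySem

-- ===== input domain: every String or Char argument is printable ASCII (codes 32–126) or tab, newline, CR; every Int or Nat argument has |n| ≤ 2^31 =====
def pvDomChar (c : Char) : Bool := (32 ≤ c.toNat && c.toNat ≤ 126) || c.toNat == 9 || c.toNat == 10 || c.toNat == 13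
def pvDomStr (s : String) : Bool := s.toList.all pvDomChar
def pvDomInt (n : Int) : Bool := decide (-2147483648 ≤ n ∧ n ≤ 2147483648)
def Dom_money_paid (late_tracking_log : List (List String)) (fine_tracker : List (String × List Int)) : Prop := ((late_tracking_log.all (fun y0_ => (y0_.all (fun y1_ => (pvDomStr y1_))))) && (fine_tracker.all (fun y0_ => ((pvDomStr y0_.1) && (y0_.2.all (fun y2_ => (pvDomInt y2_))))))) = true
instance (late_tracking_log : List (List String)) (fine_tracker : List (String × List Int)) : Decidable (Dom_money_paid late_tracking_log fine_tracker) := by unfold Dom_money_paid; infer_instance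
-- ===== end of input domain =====

-- ===== PORT A =====
-- B's Python does the same three in-place pops; this shared helper is the Lean image of
-- "late_tracking_log[0].pop(index); late_tracking_log[1].pop(index); late_tracking_log[2].pop(index)".
-- Fewer than three sublists makes Python raise IndexError (outside Pre_); here the missing pops are no-ops.
def pvPop3 (log : List (List String)) (i : Nat) : List (List String) :=
  match log with
  | l0 :: l1 :: l2 :: rest => l0.eraseIdx i :: l1.eraseIdx i :: l2.eraseIdx i :: rest
  | [l0, l1] => [l0.eraseIdx i, l1.eraseIdx i]
  | [l0] => [l0.eraseIdx i]
  | [] => []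

-- the 'for index in range(length_log)' loop of A, carrying is_remove; Sum.inr = "return money_paid(...)" request
def pvALoop (keys : List String) (length_log : Nat) (log : List (List String)) (index : Nat)
    (is_remove : Bool) : (List (List String)) ⊕ (List (List String)) :=
  if index < length_log then
    let name := (log.headD []).getD index ""   -- late_tracking_log[0][index]; in range wherever A returns
    let st := if name ∈ keys then (log, is_remove) else (pvPop3 log index, true)
    if 1 < length_log ∧ st.2 then Sum.inr st.1
    else pvALoop keys length_log st.1 (index + 1) st.2
  else Sum.inl log
termination_by length_log - index

-- the self-recursion of A; fuel (head length + 1) is enough because each restart removes one entry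
def pvAGo : Nat → List (List String) → List (String × List Int) → List (List String)
  | 0, log, _ => log
  | fuel + 1, log, fine_tracker =>
    match pvALoop (fine_tracker.map Prod.fst) (log.headD []).length log 0 false with
    | Sum.inl r => r
    | Sum.inr log' => pvAGo fuel log' fine_tracker

def money_paid (late_tracking_log : List (List String)) (fine_tracker : List (String × List Int)) : List (List String) :=
  pvAGo ((late_tracking_log.headD []).length + 1) late_tracking_log fine_tracker

-- ===== PORT B =====
lemma pvPop3_headD (log : List (List String)) (i : Nat) :
    (pvPop3 log i).headD [] = (log.headD []).eraseIdx i := by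
  match log with
  | [] => simp [pvPop3]
  | [l0] => rfl
  | [l0, l1] => rfl
  | l0 :: l1 :: l2 :: rest => rfl

-- B: a single while loop, pop at index or advance
def pvBLoop (fine_tracker : List (String × List Int)) (log : List (List String)) (index : Nat) :
    List (List String) :=
  if h : index < (log.headD []).length then
    if fine_tracker.any (fun kv => kv.1 == (log.headD []).getD index "") then
      pvBLoop fine_tracker log (index + 1)
    else
      pvBLoop fine_tracker (pvPop3 log index) index
  else log
termination_by (log.headD []).length - index
decreasing_by
  all_goals
    have hp : ((pvPop3 log index).headD []).length = (log.headD []).length - 1 := by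
      rw [pvPop3_headD]; exact List.length_eraseIdx_of_lt h
    simp only [List.headD_eq_head?_getD] at *
    omega

def money_paid_alt (late_tracking_log : List (List String)) (fine_tracker : List (String × List Int)) : List (List String) :=
  pvBLoop fine_tracker late_tracking_log 0

-- ===== PRECONDITION & SPEC =====
-- Pre_ excludes exactly the inputs where the Python A raises IndexError: an empty outer list, or a
-- to-be-removed name whose position has no counterpart in sublists 1/2 (fewer than three sublists, or
-- a ragged shorter sublist).  B raises there too; no input on which A returns is excluded.
def Pre_money_paid (late_tracking_log : List (List String)) (fine_tracker : List (String × List Int)) : Prop :=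
  late_tracking_log ≠ [] ∧
  ∀ i < (late_tracking_log.headD []).length,
    (late_tracking_log.headD []).getD i "" ∉ fine_tracker.map Prod.fst →
      3 ≤ late_tracking_log.length ∧
      i < (late_tracking_log.getD 1 []).length ∧
      i < (late_tracking_log.getD 2 []).length
instance (late_tracking_log : List (List String)) (fine_tracker : List (String × List Int)) : Decidable (Pre_money_paid late_tracking_log fine_tracker) := by unfold Pre_money_paid; infer_instance

def pvWitness_money_paid : List (List String) × (List (String × List Int)) :=
  ([["alice", "bob"], ["b1", "b2"], ["3", "1"]], [("alice", [3, 1, 2])])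

def Spec_money_paid (late_tracking_log : List (List String)) (fine_tracker : List (String × List Int)) (out : List (List String)) : Prop := out = money_paid_alt late_tracking_log fine_tracker
instance (late_tracking_log : List (List String)) (fine_tracker : List (String × List Int)) (out : List (List String)) : Decidable (Spec_money_paid late_tracking_log fine_tracker out) := by unfold Spec_money_paid; infer_instance

-- ===== CLAIM (what is proved, stated in full; the proofs are below) =====
def Claim_equal_money_paid : Prop := ∀ (late_tracking_log : List (List String)) (fine_tracker : List (String × List Int)), Dom_money_paid late_tracking_log fine_tracker → Pre_money_paid late_tracking_log fine_tracker → Spec_money_paid late_tracking_log fine_tracker (money_paid late_tracking_log fine_tracker)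

-- ===== LEMMAS AND PROOFS =====

-- the membership tests of the two ports agree
lemma pvGood_iff (ft : List (String × List Int)) (s : String) :
    (ft.any (fun kv => kv.1 == s)) = true ↔ s ∈ ft.map Prod.fst := by
  simp [List.any_eq_true]

-- A's loop when every remaining name is kept
lemma pvALoop_all_good (keys : List String) (L : Nat) (log : List (List String)) (index : Nat)
    (h : ∀ j, index ≤ j → j < L → (log.headD []).getD j "" ∈ keys) :
    pvALoop keys L log index false = Sum.inl log := by
  unfold pvALoop
  by_cases hi : index < L
  · simp only [hi, if_true]
    have hg : (log.headD []).getD index "" ∈ keys := h index le_rfl hi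
    simp only [hg, if_pos]
    have := pvALoop_all_good keys L log (index + 1) (fun j hj hjL => h j (by omega) hjL)
    simpa using this
  · simp [hi]
termination_by L - index

-- A's loop when names before i are kept and i is removed
lemma pvALoop_first_bad (keys : List String) (L : Nat) (log : List (List String)) (index i : Nat)
    (hii : index ≤ i) (hiL : i < L)
    (hbad : (log.headD []).getD i "" ∉ keys)
    (hpre : ∀ j, index ≤ j → j < i → (log.headD []).getD j "" ∈ keys) :
    pvALoop keys L log index false =
      if 1 < L then Sum.inr (pvPop3 log i) else Sum.inl (pvPop3 log i) := by
  unfold pvALoop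
  have hiL' : index < L := lt_of_le_of_lt hii hiL
  simp only [hiL', if_true]
  by_cases hcur : index = i
  · subst hcur
    simp only [hbad]
    by_cases hL : 1 < L
    · simp [hL]
    · have hL1 : L = 1 := by omega
      have hi0 : index = 0 := by omega
      subst hi0; subst hL1
      simp [pvALoop]
  · have hgood : (log.headD []).getD index "" ∈ keys := hpre index le_rfl (by omega)
    simp only [hgood, if_pos]
    have := pvALoop_first_bad keys L log (index + 1) i (by omega) hiL hbad
      (fun j hj hji => hpre j (by omega) hji)
    simpa using this
termination_by L - index

-- B's loop walks over a kept prefix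
lemma pvBLoop_skip (ft : List (String × List Int)) (log : List (List String)) (index i : Nat)
    (hii : index ≤ i) (hiL : i ≤ (log.headD []).length)
    (hpre : ∀ j, index ≤ j → j < i → (log.headD []).getD j "" ∈ ft.map Prod.fst) :
    pvBLoop ft log index = pvBLoop ft log i := by
  rcases Nat.lt_or_ge index i with hlt | hge
  · have hidx : index < (log.headD []).length := by omega
    have hgood : (ft.any (fun kv => kv.1 == (log.headD []).getD index "")) = true :=
      (pvGood_iff ft _).2 (hpre index le_rfl hlt)
    rw [pvBLoop, dif_pos hidx, if_pos hgood]
    exact pvBLoop_skip ft log (index + 1) i (by omega) hiL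
      (fun j hj hji => hpre j (by omega) hji)
  · have : index = i := by omega
    rw [this]
termination_by i - index

-- B's loop when every remaining name is kept
lemma pvBLoop_all_good (ft : List (String × List Int)) (log : List (List String)) (index : Nat)
    (h : ∀ j, index ≤ j → j < (log.headD []).length →
      (log.headD []).getD j "" ∈ ft.map Prod.fst) :
    pvBLoop ft log index = log := by
  by_cases hi : index < (log.headD []).length
  · have hgood : (ft.any (fun kv => kv.1 == (log.headD []).getD index "")) = true :=
      (pvGood_iff ft _).2 (h index le_rfl hi)
    rw [pvBLoop, dif_pos hi, if_pos hgood]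
    exact pvBLoop_all_good ft log (index + 1) (fun j hj hjL => h j (by omega) hjL)
  · rw [pvBLoop, dif_neg hi]
termination_by (log.headD []).length - index
decreasing_by
  simp only [List.headD_eq_head?_getD] at *
  omega

-- entries before the popped index are untouched
lemma pvEraseIdx_getD_lt (l : List String) (i j : Nat) (hji : j < i) :
    (l.eraseIdx i).getD j "" = l.getD j "" := by
  simp only [List.getD_eq_getElem?_getD, List.getElem?_eraseIdx_of_lt hji]

-- B restarted from 0 equals B continued at i over the kept prefix of the popped list
lemma pvBLoop_pop_restart (ft : List (String × List Int)) (log : List (List String)) (i : Nat)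
    (hiL : i < (log.headD []).length)
    (hpre : ∀ j, j < i → (log.headD []).getD j "" ∈ ft.map Prod.fst) :
    pvBLoop ft (pvPop3 log i) 0 = pvBLoop ft (pvPop3 log i) i := by
  apply pvBLoop_skip
  · omega
  · rw [pvPop3_headD, List.length_eraseIdx_of_lt hiL]; omega
  · intro j _ hji
    rw [pvPop3_headD, pvEraseIdx_getD_lt _ _ _ hji]
    exact hpre j hji

-- the main equivalence, by induction on an upper bound of the head length
lemma pvMain (ft : List (String × List Int)) :
    ∀ n log, (log.headD []).length ≤ n →
      pvAGo (n + 1) log ft = pvBLoop ft log 0 := by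
  intro n
  induction n with
  | zero =>
    intro log hlen
    rw [pvBLoop_all_good ft log 0 (fun j _ hjL => by omega)]
    rw [pvAGo, pvALoop_all_good _ _ _ _ (fun j _ hjL => by omega)]
  | succ m ih =>
    intro log hlen
    by_cases hex : ∃ i, i < (log.headD []).length ∧
        (log.headD []).getD i "" ∉ ft.map Prod.fst
    · classical
      obtain ⟨i0, ⟨hi0L, hi0bad⟩, hmin'⟩ :
          ∃ i0, (i0 < (log.headD []).length ∧ (log.headD []).getD i0 "" ∉ ft.map Prod.fst) ∧
            ∀ j, j < i0 → ¬ (j < (log.headD []).length ∧ (log.headD []).getD j "" ∉ ft.map Prod.fst) :=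
        ⟨Nat.find hex, Nat.find_spec hex, fun j hj => Nat.find_min hex hj⟩
      have hmin : ∀ j, j < i0 → (log.headD []).getD j "" ∈ ft.map Prod.fst := by
        intro j hj
        by_contra hc
        exact hmin' j hj ⟨by omega, hc⟩
      -- B side: walk to i0, pop, restart
      have hbadb : (ft.any (fun kv => kv.1 == (log.headD []).getD i0 "")) ≠ true := by
        intro hc; exact hi0bad ((pvGood_iff ft _).1 hc)
      have hB : pvBLoop ft log 0 = pvBLoop ft (pvPop3 log i0) 0 := by
        rw [pvBLoop_skip ft log 0 i0 (by omega) (by omega) (fun j _ hj => hmin j hj)]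
        rw [pvBLoop, dif_pos hi0L, if_neg hbadb]
        exact (pvBLoop_pop_restart ft log i0 hi0L hmin).symm
      have hlenpop : ((pvPop3 log i0).headD []).length = (log.headD []).length - 1 := by
        rw [pvPop3_headD, List.length_eraseIdx_of_lt hi0L]
      -- A side
      rw [pvAGo]
      rw [pvALoop_first_bad (ft.map Prod.fst) (log.headD []).length log 0 i0
        (by omega) hi0L hi0bad (fun j _ hj => hmin j hj)]
      by_cases hL : 1 < (log.headD []).length
      · simp only [hL, if_true]
        rw [ih (pvPop3 log i0) (by omega)]
        exact hB.symm
      · -- the head has length exactly 1, so i0 = 0 and the popped head is empty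
        simp only [hL, if_false]
        rw [hB]
        exact (pvBLoop_all_good ft (pvPop3 log i0) 0
          (fun j _ hjL => by rw [hlenpop] at hjL; omega)).symm
    · push Not at hex
      rw [pvBLoop_all_good ft log 0 (fun j _ hjL => hex j hjL)]
      rw [pvAGo, pvALoop_all_good _ _ _ _ (fun j _ hjL => hex j hjL)]

-- ===== VERDICT (by name: the statement is the Claim_ definition above) =====
theorem money_paid_spec : Claim_equal_money_paid := by
  intro log ft _ _
  unfold Spec_money_paid money_paid money_paid_alt
  exact pvMain ft (log.headD []).length log le_rfl
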